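-- pv_equiv track=rewrite | github.com/pacmanzou/practice | py_test/function.py | upper_str
-- ===== SOURCE A (Python) =====
-- def upper_str(string: str):
--     string_tmp = ""
--     for s in string:
--         if "z" > s > "a":
--             string_tmp += chr(ord(s) - 32)
--         else:
--             string_tmp += s
--     return string_tmp
-- ===== SOURCE B (Python) =====
-- _TABLE = {ord(c): ord(c) - 32 for c in "bcdefghijklmnopqrstuvwxy"}
--
--
-- def upper_str(string: str):
--     return string.translate(_TABLE)
-- ===== Notes on version B (the rewrite author's own statement) =====
-- stated objective: faster
-- what changed: Replaces the per-character if/else accumulation loop (repeated string concatenation) with a precomputed ord-to-ord translation table applied via str.translate in one pass.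
import Mathlib
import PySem

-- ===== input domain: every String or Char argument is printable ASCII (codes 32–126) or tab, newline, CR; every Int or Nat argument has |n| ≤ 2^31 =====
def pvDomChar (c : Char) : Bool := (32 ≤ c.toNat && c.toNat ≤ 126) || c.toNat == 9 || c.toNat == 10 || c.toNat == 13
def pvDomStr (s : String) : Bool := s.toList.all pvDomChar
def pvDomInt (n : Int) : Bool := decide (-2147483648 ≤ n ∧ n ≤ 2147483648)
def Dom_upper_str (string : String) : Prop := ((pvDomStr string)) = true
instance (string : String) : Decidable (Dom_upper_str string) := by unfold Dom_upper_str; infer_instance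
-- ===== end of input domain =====

-- B replaces A's per-character if/else accumulation loop by a precomputed ord→ord translation table applied via str.translate (idiomatic).

-- ===== PORT A =====
-- literal port: accumulate string_tmp, branch per character ("z" > s > "a" on 1-char strings is char code order)
def upper_str (string : String) : String :=
  String.ofList (string.toList.foldl
    (fun acc s => if 'a' < s ∧ s < 'z' then acc ++ [Char.ofNat (s.toNat - 32)] else acc ++ [s]) [])

-- ===== PORT B =====
-- the table {ord(c): ord(c)-32 for c in "bcdefghijklmnopqrstuvwxy"}
def pvTable_upper : PySem.Dict Int Int :=
  "bcdefghijklmnopqrstuvwxy".toList.foldl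
    (fun d c => d.insert (c.toNat : Int) ((c.toNat : Int) - 32)) PySem.Dict.empty

-- str.translate(table): each char's ordinal is looked up in the table; a hit maps to chr(value), a miss keeps the char
def upper_str_alt (string : String) : String :=
  String.ofList (string.toList.map (fun c =>
    match pvTable_upper.get? (c.toNat : Int) with
    | some n => Char.ofNat n.toNat
    | none => c))

-- ===== PRECONDITION & SPEC =====
def Spec_upper_str (string : String) (out : String) : Prop := out = upper_str_alt string
instance (string : String) (out : String) : Decidable (Spec_upper_str string out) := by unfold Spec_upper_str; infer_instance

-- ===== CLAIM (what is proved, stated in full; the proofs are below) =====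
def Claim_equal_upper_str : Prop := ∀ (string : String), Dom_upper_str string → Spec_upper_str string (upper_str string)

-- ===== LEMMAS AND PROOFS =====

-- first-match scan returns none when no key matches
lemma pv_get?_none_aux (l : List (Int × Int)) (k : Int) (h : ∀ p ∈ l, (p.1 == k) = false) :
    (PySem.Dict.mk l).get? k = none := by
  induction l with
  | nil => rfl
  | cons p rest ih =>
    obtain ⟨a, b⟩ := p
    rw [PySem.Dict.get?_mk_cons, if_neg (by simp [h (a, b) (List.mem_cons_self)])]
    exact ih fun q hq => h q (List.mem_cons_of_mem _ hq)

-- the translation table is exactly k ↦ k - 32 on 98 ≤ k ≤ 121 (ord 'b' .. ord 'y')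
set_option maxHeartbeats 1000000 in
lemma pvTable_upper_get (k : Int) :
    pvTable_upper.get? k = if 98 ≤ k ∧ k ≤ 121 then some (k - 32) else none := by
  have htab : pvTable_upper = PySem.Dict.mk
      [(98, 66), (99, 67), (100, 68), (101, 69), (102, 70), (103, 71), (104, 72), (105, 73),
       (106, 74), (107, 75), (108, 76), (109, 77), (110, 78), (111, 79), (112, 80), (113, 81),
       (114, 82), (115, 83), (116, 84), (117, 85), (118, 86), (119, 87), (120, 88), (121, 89)] := by
    decide
  rw [htab]
  by_cases hk : 98 ≤ k ∧ k ≤ 121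
  · rw [if_pos hk]
    obtain ⟨h1, h2⟩ := hk
    interval_cases k <;> rfl
  · rw [if_neg hk]
    exact pv_get?_none_aux _ k (by intro p hp; fin_cases hp <;> simp <;> omega)

-- per character, A's branch and B's table lookup agree
lemma pv_char_eq (c : Char) :
    (if 'a' < c ∧ c < 'z' then Char.ofNat (c.toNat - 32) else c) =
    (match pvTable_upper.get? ((c.toNat : Int)) with
     | some n => Char.ofNat n.toNat
     | none => c) := by
  have hlt : ∀ a b : Char, (a < b) ↔ a.toNat < b.toNat := by
    intro a b
    rw [Char.lt_def, UInt32.lt_iff_toNat_lt]; rfl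
  rw [pvTable_upper_get]
  by_cases h : 'a' < c ∧ c < 'z'
  · have h1 : 97 < c.toNat := by have := (hlt 'a' c).mp h.1; simpa using this
    have h2 : c.toNat < 122 := by have := (hlt c 'z').mp h.2; simpa using this
    have hk : 98 ≤ (c.toNat : Int) ∧ (c.toNat : Int) ≤ 121 := by omega
    simp only [if_pos h, if_pos hk]
    congr 1
    omega
  · have h' : ¬ (98 ≤ (c.toNat : Int) ∧ (c.toNat : Int) ≤ 121) := by
      intro hk
      exact h ⟨(hlt 'a' c).mpr (by simpa using (by omega : 97 < c.toNat)),
               (hlt c 'z').mpr (by simpa using (by omega : c.toNat < 122))⟩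
    rw [if_neg h, if_neg h']

-- ===== VERDICT (by name: the statement is the Claim_ definition above) =====
theorem upper_str_spec : Claim_equal_upper_str := by
  intro string _
  unfold Spec_upper_str upper_str upper_str_alt
  congr 1
  rw [show (fun (acc : List Char) s =>
        if 'a' < s ∧ s < 'z' then acc ++ [Char.ofNat (s.toNat - 32)] else acc ++ [s]) =
      (fun acc s => acc ++ [if 'a' < s ∧ s < 'z' then Char.ofNat (s.toNat - 32) else s]) from
    funext fun acc => funext fun s => by split_ifs <;> rfl]
  rw [PySem.List.foldl_append_singleton_eq_map]
  exact List.map_congr_left fun c _ => pv_char_eq c
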